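-- pv_equiv track=rewrite | github.com/SREENIVASAN-PRASANTH/CODING-PRACTICE | python DSA/The_richest_person.py | get_richest_person_name
-- ===== SOURCE A (Python) =====
-- def get_richest_person_name(persons_dict):
--     max_income = max(persons_dict.values())
--     richest_persons_name_list = []
--     for each_person in persons_dict.keys():
--         if (persons_dict[each_person] == max_income):
--             richest_persons_name_list.append(each_person)
--     richest_persons_name_list.sort()
--     return richest_persons_name_list[0]
-- ===== SOURCE B (Python) =====
-- def get_richest_person_name(persons_dict):
--     max_income = max(persons_dict.values())
--     best = None
--     for name, income in persons_dict.items():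
--         if income == max_income and (best is None or name < best):
--             best = name
--     return best
-- ===== Notes on version B (the rewrite author's own statement) =====
-- stated objective: simpler
-- what changed: Replaces the build-filter-list-then-sort-and-take-head pipeline with a single pass over items that tracks the lexicographically smallest max-income name directly; no list is built and nothing is sorted.
import Mathlib
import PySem

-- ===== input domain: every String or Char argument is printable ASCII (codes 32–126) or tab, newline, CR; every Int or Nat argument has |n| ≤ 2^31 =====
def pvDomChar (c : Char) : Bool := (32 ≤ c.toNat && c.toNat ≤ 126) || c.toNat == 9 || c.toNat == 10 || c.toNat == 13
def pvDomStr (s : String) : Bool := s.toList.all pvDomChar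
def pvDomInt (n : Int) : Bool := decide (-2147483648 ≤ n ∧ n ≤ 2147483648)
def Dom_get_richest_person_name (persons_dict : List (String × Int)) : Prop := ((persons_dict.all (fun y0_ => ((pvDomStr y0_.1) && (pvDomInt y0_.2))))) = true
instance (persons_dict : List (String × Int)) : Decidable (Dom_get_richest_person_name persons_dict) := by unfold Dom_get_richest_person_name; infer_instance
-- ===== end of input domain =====

-- B replaces A's filter-list + sort + take-head pipeline by a single pass that tracks the
-- lexicographically smallest max-income name (objective: simpler; return value only).

-- ===== PORT A =====
-- max_income = max(d.values()); collect keys k with d[k] == max_income; sort; return [0]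
def get_richest_person_name (persons_dict : List (String × Int)) : String :=
  match PySem.List.max? (PySem.Dict.mk persons_dict).values (fun v => v) with
  | none => ""   -- max() on an empty dict raises ValueError: excluded by Pre_
  | some max_income =>
    (PySem.List.pyGet?
      (PySem.List.sorted
        ((PySem.Dict.mk persons_dict).keys.foldl
          -- d[k]: k is drawn from d.keys, so KeyError is impossible; getD's default is never used
          (fun acc k => if (PySem.Dict.mk persons_dict).getD k 0 = max_income then acc ++ [k] else acc)
          [])
        (fun x => x) false)
      0).getD ""   -- [0]: the sorted list is nonempty since the max is attained

-- ===== PORT B =====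
def get_richest_person_name_alt (persons_dict : List (String × Int)) : String :=
  match PySem.List.max? (persons_dict.map Prod.snd) (fun v => v) with
  | none => ""   -- max() on an empty dict raises ValueError: excluded by Pre_
  | some max_income =>
    (persons_dict.foldl
      (fun best kv =>
        if kv.2 = max_income then
          match best with
          | none => some kv.1
          | some b => if kv.1 < b then some kv.1 else some b
        else best)
      none).getD ""   -- best is some _ since the max is attained

-- ===== PRECONDITION & SPEC =====
-- Pre_ excludes the empty dict (A's max() raises ValueError) and association lists with
-- duplicate keys, which represent no Python dict (a dict's keys are unique).
def Pre_get_richest_person_name (persons_dict : List (String × Int)) : Prop :=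
  persons_dict ≠ [] ∧ (persons_dict.map Prod.fst).Nodup
instance (persons_dict : List (String × Int)) : Decidable (Pre_get_richest_person_name persons_dict) := by unfold Pre_get_richest_person_name; infer_instance

def pvWitness_get_richest_person_name : (List (String × Int)) := [("alice", 3), ("bob", 3)]

def Spec_get_richest_person_name (persons_dict : List (String × Int)) (out : String) : Prop := out = get_richest_person_name_alt persons_dict
instance (persons_dict : List (String × Int)) (out : String) : Decidable (Spec_get_richest_person_name persons_dict out) := by unfold Spec_get_richest_person_name; infer_instance

-- ===== CLAIM (what is proved, stated in full; the proofs are below) =====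
def Claim_equal_get_richest_person_name : Prop := ∀ (persons_dict : List (String × Int)), Dom_get_richest_person_name persons_dict → Pre_get_richest_person_name persons_dict → Spec_get_richest_person_name persons_dict (get_richest_person_name persons_dict)

-- ===== LEMMAS AND PROOFS =====

-- under unique keys, filtering the key list by "dict lookup = m" is filtering the pairs by "value = m"
theorem pv_filter_keys_lookup (l : List (String × Int)) (m : Int)
    (h : (l.map Prod.fst).Nodup) :
    (l.map Prod.fst).filter (fun k => decide ((PySem.Dict.mk l).getD k 0 = m))
      = (l.filter (fun kv => decide (kv.2 = m))).map Prod.fst := by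
  induction l with
  | nil => rfl
  | cons kv t ih =>
    obtain ⟨k0, v0⟩ := kv
    rw [List.map_cons, List.nodup_cons] at h
    obtain ⟨hk, hnd⟩ := h
    have hget : (PySem.Dict.mk ((k0, v0) :: t)).getD k0 0 = v0 := by
      rw [PySem.Dict.getD_eq_get?_getD, PySem.Dict.get?_mk_cons]
      simp
    have hcongr : ∀ k ∈ t.map Prod.fst,
        (decide ((PySem.Dict.mk ((k0, v0) :: t)).getD k 0 = m))
          = (decide ((PySem.Dict.mk t).getD k 0 = m)) := by
      intro k hkmem
      have hne : k0 ≠ k := fun he => hk (he ▸ hkmem)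
      rw [PySem.Dict.getD_eq_get?_getD, PySem.Dict.get?_mk_cons]
      simp [hne, PySem.Dict.getD_eq_get?_getD]
    by_cases hv : v0 = m
    · rw [List.map_cons,
          List.filter_cons_of_pos (by rw [hget]; simpa using hv),
          List.filter_cons_of_pos (by simpa using hv),
          List.map_cons, List.filter_congr hcongr, ih hnd]
    · rw [List.map_cons,
          List.filter_cons_of_neg (by rw [hget]; simpa using hv),
          List.filter_cons_of_neg (by simpa using hv),
          List.filter_congr hcongr, ih hnd]

-- B's fold over the pairs = the same min-tracking fold over the filtered key list
theorem pv_fold_pairs_eq_fold_names (m : Int) (l : List (String × Int)) (acc : Option String) :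
    l.foldl
      (fun best kv =>
        if kv.2 = m then
          match best with
          | none => some kv.1
          | some b => if kv.1 < b then some kv.1 else some b
        else best) acc
      = ((l.filter (fun kv => decide (kv.2 = m))).map Prod.fst).foldl
          (fun best k =>
            match best with
            | none => some k
            | some b => if k < b then some k else some b) acc := by
  induction l generalizing acc with
  | nil => rfl
  | cons kv t ih =>
    by_cases hv : kv.2 = m
    · rw [List.foldl_cons, List.filter_cons_of_pos (by simpa using hv),
          List.map_cons, List.foldl_cons]
      rw [if_pos hv, ih]
    · rw [List.foldl_cons, List.filter_cons_of_neg (by simpa using hv)]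
      rw [if_neg hv, ih]

-- the min-tracking fold from a seeded accumulator is the running min
theorem pv_fold_some_eq_min (t : List String) (b : String) :
    t.foldl
      (fun best k =>
        match best with
        | none => some k
        | some b => if k < b then some k else some b) (some b)
      = some (t.foldl min b) := by
  induction t generalizing b with
  | nil => rfl
  | cons x t ih =>
    rw [List.foldl_cons, List.foldl_cons]
    dsimp only
    have hg : (if x < b then some x else some b) = some (min b x) := by
      rcases lt_or_ge x b with h | h
      · rw [if_pos h, min_eq_right (le_of_lt h)]
      · rw [if_neg (not_lt.mpr h), min_eq_left h]
    rw [hg, ih]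

theorem pv_fold_none_eq_min? (names : List String) :
    names.foldl
      (fun best k =>
        match best with
        | none => some k
        | some b => if k < b then some k else some b) none
      = PySem.List.min? names (fun x => x) := by
  cases names with
  | nil => rfl
  | cons x t =>
    rw [List.foldl_cons]
    dsimp only
    rw [pv_fold_some_eq_min, PySem.List.min?_id_cons]

-- head of sorted = min? (both are THE minimum of a nonempty String list)
theorem pv_head_sorted_eq_min? (names : List String) (hne : names ≠ []) :
    (PySem.List.pyGet? (PySem.List.sorted names (fun x => x) false) 0).getD ""
      = (PySem.List.min? names (fun x => x)).getD "" := by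
  have hsne : PySem.List.sorted names (fun x => x) false ≠ [] := by
    simpa [PySem.List.sorted_eq_nil_iff] using hne
  obtain ⟨h, t, hs⟩ := List.exists_cons_of_ne_nil hsne
  obtain ⟨mn, hmn⟩ : ∃ mn, PySem.List.min? names (fun x => x) = some mn := by
    cases hm : PySem.List.min? names (fun x => x) with
    | none => exact absurd ((PySem.List.min?_eq_none_iff names _).mp hm) hne
    | some mn => exact ⟨mn, rfl⟩
  have hhmem : h ∈ names :=
    (PySem.List.mem_sorted names _ false h).mp (hs ▸ List.mem_cons_self)
  have hmnmem : mn ∈ names := PySem.List.min?_mem hmn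
  have h1 : h ≤ mn := PySem.List.key_head_sorted_le names _ hs mn hmnmem
  have h2 : mn ≤ h := PySem.List.min?_isMin hmn h hhmem
  rw [hs, hmn]
  simp [PySem.List.pyGet?, PySem.List.pyIdx?, le_antisymm h1 h2]

-- ===== VERDICT (by name: the statement is the Claim_ definition above) =====
theorem get_richest_person_name_spec : Claim_equal_get_richest_person_name := by
  intro l _ hpre
  obtain ⟨hne, hnd⟩ := hpre
  unfold Spec_get_richest_person_name get_richest_person_name get_richest_person_name_alt
  rw [show (PySem.Dict.mk l).values = l.map Prod.snd from rfl]
  cases hmax : PySem.List.max? (l.map Prod.snd) (fun v => v) with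
  | none => rfl
  | some m =>
    dsimp only
    rw [show (PySem.Dict.mk l).keys = l.map Prod.fst from rfl,
        PySem.List.foldl_append_ite_eq_filter (fun k => (PySem.Dict.mk l).getD k 0 = m)
          (l.map Prod.fst) [],
        pv_fold_pairs_eq_fold_names, pv_fold_none_eq_min?, List.nil_append,
        pv_filter_keys_lookup l m hnd]
    have hfne : (l.filter (fun kv => decide (kv.2 = m))).map Prod.fst ≠ [] := by
      have hmem : m ∈ l.map Prod.snd := PySem.List.max?_mem hmax
      obtain ⟨kv, hkv, hv⟩ := List.mem_map.mp hmem
      have hmem2 : kv ∈ l.filter (fun kv => decide (kv.2 = m)) :=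
        List.mem_filter.mpr ⟨hkv, by simp [hv]⟩
      simp only [ne_eq, List.map_eq_nil_iff]
      exact fun he => List.not_mem_nil (he ▸ hmem2)
    exact pv_head_sorted_eq_min? _ hfne
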